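-- pv_equiv track=rewrite | github.com/adrata/strategy | scripts/archive/create_snyk_report_final.py | process_markdown_content
-- ===== SOURCE A (Python) =====
-- def process_markdown_content(md_content):
--     """Process markdown content and convert to structured data"""
--     lines = md_content.split('\n')
--     processed_content = []
--
--     for line in lines:
--         line = line.strip()
--         if not line:
--             continue
--
--         # Main titles (# )
--         if line.startswith('# '):
--             processed_content.append(('title', line[2:]))
--         # Subtitles (## )
--         elif line.startswith('## '):
--             processed_content.append(('subtitle', line[3:]))
--         # Headers (### )
--         elif line.startswith('### '):
--             processed_content.append(('header', line[4:]))
--         # Subheaders (#### )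
--         elif line.startswith('#### '):
--             processed_content.append(('subheader', line[5:]))
--         # Bullets (- or * )
--         elif line.startswith(('- ', '* ')):
--             processed_content.append(('bullet', line[2:]))
--         # Horizontal rules
--         elif line.startswith('---'):
--             processed_content.append(('hr', ''))
--         # Regular paragraphs
--         else:
--             processed_content.append(('body', line))
--
--     return processed_content
-- ===== SOURCE B (Python) =====
-- HEAD = {'#': 'title', '##': 'subtitle', '###': 'header', '####': 'subheader',
--         '-': 'bullet', '*': 'bullet'}
-- WS = ' \t\n\r\x0b\x0c'
--
--
-- def process_markdown_content(md_content):
--     """Process markdown content and convert to structured data"""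
--     out = []
--     i, n = 0, len(md_content)
--     while i < n:
--         j = md_content.find('\n', i)
--         if j == -1:
--             j = n
--         a, b = i, j
--         while a < b and md_content[a] in WS:
--             a += 1
--         while b > a and md_content[b - 1] in WS:
--             b -= 1
--         i = j + 1
--         if a == b:
--             continue
--         line = md_content[a:b]
--         head, sep, rest = line.partition(' ')
--         tag = HEAD.get(head)
--         if sep and tag is not None:
--             out.append((tag, rest))
--         elif line.startswith('---'):
--             out.append(('hr', ''))
--         else:
--             out.append(('body', line))
--     return out
-- ===== Notes on version B (the rewrite author's own statement) =====
-- stated objective: alternative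
-- what changed: B replaces A's per-line split/strip/startswith-chain pipeline by a single index scanner over the raw string: it locates each newline with find, trims by moving two indices, and classifies a line by partitioning off its first space-delimited token and looking that token up in a dict, with only the horizontal rule left as a prefix test.
import Mathlib
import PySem

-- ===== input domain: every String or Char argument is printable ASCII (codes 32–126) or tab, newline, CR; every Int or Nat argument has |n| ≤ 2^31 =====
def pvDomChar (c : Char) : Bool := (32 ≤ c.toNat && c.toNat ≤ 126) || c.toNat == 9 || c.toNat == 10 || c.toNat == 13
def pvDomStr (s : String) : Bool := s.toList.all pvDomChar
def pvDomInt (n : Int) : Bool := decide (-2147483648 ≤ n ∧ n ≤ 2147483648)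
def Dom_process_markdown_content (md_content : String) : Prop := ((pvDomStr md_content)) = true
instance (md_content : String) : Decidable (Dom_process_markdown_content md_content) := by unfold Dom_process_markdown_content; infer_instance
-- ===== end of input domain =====

-- B replaces A's split/strip/startswith-chain pass by a single index scanner over the raw
-- string (manual newline search, index trimming, first-token dict dispatch); objective: alternative.

-- ===== PORT A =====
-- A's per-line branch chain (Python appends to the accumulator in every branch;
-- here the appended pair is returned and appended by the loop body).
def pvDispatchA (ln : List Char) : String × String :=
  if PySem.Chars.startswith ln ['#', ' '] then
    ("title", String.ofList (PySem.List.slice ln (some 2) none))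
  else if PySem.Chars.startswith ln ['#', '#', ' '] then
    ("subtitle", String.ofList (PySem.List.slice ln (some 3) none))
  else if PySem.Chars.startswith ln ['#', '#', '#', ' '] then
    ("header", String.ofList (PySem.List.slice ln (some 4) none))
  else if PySem.Chars.startswith ln ['#', '#', '#', '#', ' '] then
    ("subheader", String.ofList (PySem.List.slice ln (some 5) none))
  else if PySem.Chars.startswith ln ['-', ' '] || PySem.Chars.startswith ln ['*', ' '] then
    ("bullet", String.ofList (PySem.List.slice ln (some 2) none))
  else if PySem.Chars.startswith ln ['-', '-', '-'] then
    ("hr", "")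
  else
    ("body", String.ofList ln)

def process_markdown_content (md_content : String) : List (String × String) :=
  let lines := PySem.Chars.splitOn md_content.toList ['\n']
  lines.foldl (fun acc raw =>
    let ln := PySem.Chars.strip raw
    if ln = [] then acc else acc ++ [pvDispatchA ln]) []

-- ===== PORT B =====
-- Source B's WS constant: membership of a char in the string ' \t\n\r\x0b\x0c'
def pvWSB (c : Char) : Bool :=
  [' ', '\t', '\n', '\r', Char.ofNat 11, Char.ofNat 12].contains c

-- Source B's two trimming index loops: a advances over WS from the left, b retreats from the right;
-- line = md_content[a:b]
def pvTrimB (l : List Char) : List Char :=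
  let l1 := l.dropWhile pvWSB
  (l1.reverse.dropWhile pvWSB).reverse

-- Source B's HEAD dict
def pvHeadMap : PySem.Dict String String :=
  PySem.Dict.mk [("#", "title"), ("##", "subtitle"), ("###", "header"),
                 ("####", "subheader"), ("-", "bullet"), ("*", "bullet")]

-- Source B's per-line classification: line.partition(' ') is ported by hand (exact:
-- head = chars before the first space, sep nonempty iff ' ' occurs, rest = the remainder)
def pvTagB (s : List Char) : String × String :=
  let head := s.takeWhile (fun c => decide (c ≠ ' '))
  let rest := s.drop (head.length + 1)
  match s.contains ' ', pvHeadMap.get? (String.ofList head) with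
  | true, some t => (t, String.ofList rest)
  | _, _ =>
    if PySem.Chars.startswith s ['-', '-', '-'] then ("hr", "")
    else ("body", String.ofList s)

-- termination helper for the scanner's advance past the newline
theorem pvTailDrop_lt (p : Char → Bool) (c : Char) (cs : List Char) :
    ((c :: cs).dropWhile p).tail.length < (c :: cs).length := by
  have h := List.length_dropWhile_le p (c :: cs)
  cases hd : (c :: cs).dropWhile p with
  | nil => simp
  | cons d ds =>
    rw [hd] at h
    simp only [List.tail_cons, List.length_cons] at *
    omega

-- Source B's while loop over the raw string: one recursive step per line region
-- (j = find('\n', i) → takeWhile; i = j + 1 → tail of the dropWhile)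
def pvScanB : List Char → List (String × String)
  | [] => []
  | c :: cs =>
    let line := (c :: cs).takeWhile (fun x => decide (x ≠ '\n'))
    let rest := ((c :: cs).dropWhile (fun x => decide (x ≠ '\n'))).tail
    let t := pvTrimB line
    (if t = [] then [] else [pvTagB t]) ++ pvScanB rest
termination_by l => l.length
decreasing_by exact pvTailDrop_lt _ c cs

def process_markdown_content_alt (md_content : String) : List (String × String) :=
  pvScanB md_content.toList

-- ===== PRECONDITION & SPEC =====
def Spec_process_markdown_content (md_content : String) (out : List (String × String)) : Prop := out = process_markdown_content_alt md_content
instance (md_content : String) (out : List (String × String)) : Decidable (Spec_process_markdown_content md_content out) := by unfold Spec_process_markdown_content; infer_instance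

-- ===== CLAIM (what is proved, stated in full; the proofs are below) =====
def Claim_equal_process_markdown_content : Prop := ∀ (md_content : String), Dom_process_markdown_content md_content → Spec_process_markdown_content md_content (process_markdown_content md_content)

-- ===== LEMMAS AND PROOFS =====

set_option maxRecDepth 4000

def pvSplitNL : List Char → List Char → List (List Char)
  | pre, [] => [pre]
  | pre, c :: r => if c = '\n' then pre :: pvSplitNL [] r else pvSplitNL (pre ++ [c]) r


theorem pvGo (fuel : Nat) (l cur : List Char) (acc : List (List Char)) (h : l.length ≤ fuel) :
    PySem.Chars.splitOn.go ['\n'] fuel l cur acc = acc.reverse ++ pvSplitNL cur.reverse l := by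
  induction fuel generalizing l cur acc with
  | zero =>
    have : l = [] := by cases l <;> simp_all
    subst this
    simp [PySem.Chars.splitOn.go, pvSplitNL]
  | succ f ih =>
    cases l with
    | nil => simp [PySem.Chars.splitOn.go, pvSplitNL]
    | cons c rest =>
      simp only [PySem.Chars.splitOn.go]
      by_cases hc : c = '\n'
      · subst hc
        rw [if_pos (by simp [List.isPrefixOf])]
        simp only [List.length_cons] at h
        rw [ih _ _ _ (by simpa using Nat.le_of_succ_le_succ h)]
        simp [pvSplitNL]
      · rw [if_neg (by simp [List.isPrefixOf]; exact fun a => absurd a.symm hc)]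
        simp only [List.length_cons] at h
        rw [ih _ _ _ (Nat.le_of_succ_le_succ h)]
        simp [pvSplitNL, hc]

theorem pvSplitOn_nl (l : List Char) : PySem.Chars.splitOn l ['\n'] = pvSplitNL [] l := by
  have := pvGo (l.length + 1) l [] [] (by omega)
  simpa [PySem.Chars.splitOn] using this

theorem chEq (c : Char) (n : Nat) (h : c.toNat = n) : c = Char.ofNat n := by
  rw [← h, Char.ofNat_toNat]

theorem pvWS_eq (c : Char) (h : pvDomChar c = true) : PySem.Chars.isspace c = pvWSB c := by
  unfold pvDomChar at h
  simp only [Bool.or_eq_true, Bool.and_eq_true, decide_eq_true_eq, beq_iff_eq] at h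
  unfold PySem.Chars.isspace pvWSB
  by_cases h32 : c.toNat = 32
  · rw [chEq c 32 h32]; decide
  · by_cases h9 : c.toNat = 9
    · rw [chEq c 9 h9]; decide
    · by_cases h10 : c.toNat = 10
      · rw [chEq c 10 h10]; decide
      · by_cases h13 : c.toNat = 13
        · rw [chEq c 13 h13]; decide
        · -- c is none of the WS chars: both sides false
          have hsp : (decide (c.toNat = 32) || decide (9 ≤ c.toNat) && decide (c.toNat ≤ 13) ||
              decide (28 ≤ c.toNat) && decide (c.toNat ≤ 31) || decide (c.toNat = 133) ||
              decide (c.toNat = 160) || decide (c.toNat = 5760) ||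
              decide (8192 ≤ c.toNat) && decide (c.toNat ≤ 8202) || decide (c.toNat = 8232) ||
              decide (c.toNat = 8233) || decide (c.toNat = 8239) || decide (c.toNat = 8287) ||
              decide (c.toNat = 12288)) = false := by
            simp only [Bool.or_eq_false_iff, Bool.and_eq_false_iff, decide_eq_false_iff_not]
            omega
          rw [hsp]
          have h11 : c ≠ Char.ofNat 11 := by
            intro he; rw [he] at h; revert h; decide
          have h12 : c ≠ Char.ofNat 12 := by
            intro he; rw [he] at h; revert h; decide
          have hs : c ≠ ' ' := fun he => h32 (he ▸ rfl)
          have ht : c ≠ '\t' := fun he => h9 (he ▸ rfl)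
          have hn : c ≠ '\n' := fun he => h10 (he ▸ rfl)
          have hr : c ≠ '\r' := fun he => h13 (he ▸ rfl)
          simp [List.contains_eq_mem, hs, ht, hn, hr, h11, h12]

theorem pvDropWhile_congr {p q : Char → Bool} : ∀ (l : List Char),
    (∀ c ∈ l, p c = q c) → l.dropWhile p = l.dropWhile q := by
  intro l h
  induction l with
  | nil => rfl
  | cons c cs ih =>
    rw [List.dropWhile_cons, List.dropWhile_cons, h c (by simp)]
    split
    · exact ih (fun c hc => h c (by simp [hc]))
    · rfl

theorem pvStrip_eq_trim (l : List Char) (h : ∀ c ∈ l, pvDomChar c = true) :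
    PySem.Chars.strip l = pvTrimB l := by
  unfold PySem.Chars.strip PySem.Chars.rstrip PySem.Chars.lstrip pvTrimB
  rw [pvDropWhile_congr l (fun c hc => pvWS_eq c (h c hc))]
  congr 1
  apply pvDropWhile_congr
  intro c hc
  apply pvWS_eq
  apply h
  rw [List.mem_reverse] at hc
  exact (List.dropWhile_sublist _).mem hc

theorem pvKey_iff (k : List Char) (hk : ∀ c ∈ k, c ≠ ' ') : ∀ s : List Char,
    ((k ++ [' ']) <+: s) ↔ (s.takeWhile (fun c => decide (c ≠ ' ')) = k ∧ ' ' ∈ s) := by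
  induction k with
  | nil =>
    intro s
    cases s with
    | nil => simp
    | cons c t =>
      by_cases hc : c = ' '
      · subst hc; simp
      · simp [List.cons_prefix_cons, hc, Ne.symm hc]
  | cons a k ih =>
    intro s
    cases s with
    | nil => simp
    | cons c t =>
      have ha : a ≠ ' ' := hk a (by simp)
      have ih' := ih (fun c hc => hk c (by simp [hc])) t
      by_cases hc : c = ' '
      · subst hc; simp [List.cons_prefix_cons, ha]
      · rw [List.cons_append, List.cons_prefix_cons, List.takeWhile_cons,
          if_pos (by simp [hc])]
        constructor
        · rintro ⟨rfl, hp⟩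
          obtain ⟨htk, hm⟩ := ih'.mp hp
          exact ⟨by rw [htk], List.mem_cons_of_mem _ hm⟩
        · rintro ⟨h1, h2⟩
          obtain ⟨rfl, htk⟩ : c = a ∧ List.takeWhile (fun c => decide (c ≠ ' ')) t = k := by
            have := List.cons.injEq c (List.takeWhile (fun c => decide (c ≠ ' ')) t) a k ▸ h1
            simpa using h1
          have hm : ' ' ∈ t := by
            rcases List.mem_cons.mp h2 with h | h
            · exact absurd h.symm hc
            · exact h
          exact ⟨rfl, ih'.mpr ⟨htk, hm⟩⟩


theorem pvTag_eq (s : List Char) : pvDispatchA s = pvTagB s := by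
  have K : ∀ (p k : List Char), p = k ++ [' '] → (∀ c ∈ k, c ≠ ' ') →
      ((PySem.Chars.startswith s p = true) ↔
        (s.takeWhile (fun c => decide (c ≠ ' ')) = k ∧ ' ' ∈ s)) := by
    intro p k hp hk
    rw [hp, PySem.Chars.startswith_iff]
    exact pvKey_iff k hk s
  have K1 := K ['#', ' '] ['#'] rfl (by simp)
  have K2 := K ['#', '#', ' '] ['#', '#'] rfl (by simp)
  have K3 := K ['#', '#', '#', ' '] ['#', '#', '#'] rfl (by simp)
  have K4 := K ['#', '#', '#', '#', ' '] ['#', '#', '#', '#'] rfl (by simp)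
  have KD := K ['-', ' '] ['-'] rfl (by simp)
  have KS := K ['*', ' '] ['*'] rfl (by simp)
  have e1 : "#" = String.ofList ['#'] := rfl
  have e2 : "##" = String.ofList ['#','#'] := rfl
  have e3 : "###" = String.ofList ['#','#','#'] := rfl
  have e4 : "####" = String.ofList ['#','#','#','#'] := rfl
  have e5 : "-" = String.ofList ['-'] := rfl
  have e6 : "*" = String.ofList ['*'] := rfl
  unfold pvDispatchA pvTagB
  cases hcont : s.contains ' ' with
  | false =>
    have hsp : ¬ (' ' ∈ s) := by
      rw [List.contains_eq_mem] at hcont; simpa using hcont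
    rcases hget : pvHeadMap.get? (String.ofList (s.takeWhile (fun c => decide (c ≠ ' ')))) with _ | t <;>
      simp only [] <;>
      rw [if_neg (fun hsw => hsp ((K1.mp hsw).2)), if_neg (fun hsw => hsp ((K2.mp hsw).2)),
        if_neg (fun hsw => hsp ((K3.mp hsw).2)), if_neg (fun hsw => hsp ((K4.mp hsw).2)),
        if_neg (fun hsw => by
          rcases Bool.or_eq_true_iff.mp hsw with h | h
          · exact hsp ((KD.mp h).2)
          · exact hsp ((KS.mp h).2))]
  | true =>
    have hsp : ' ' ∈ s := by
      rw [List.contains_eq_mem] at hcont; simpa using hcont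
    rcases hget : pvHeadMap.get? (String.ofList (s.takeWhile (fun c => decide (c ≠ ' ')))) with _ | t
    · -- head matches no key
      have hget0 := hget
      simp only [pvHeadMap, PySem.Dict.get?_mk_cons, beq_iff_eq] at hget
      split_ifs at hget with g1 g2 g3 g4 g5 g6
      have n1 : s.takeWhile (fun c => decide (c ≠ ' ')) ≠ ['#'] := fun h => g1 (by rw [h])
      have n2 : s.takeWhile (fun c => decide (c ≠ ' ')) ≠ ['#','#'] := fun h => g2 (by rw [h])
      have n3 : s.takeWhile (fun c => decide (c ≠ ' ')) ≠ ['#','#','#'] := fun h => g3 (by rw [h])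
      have n4 : s.takeWhile (fun c => decide (c ≠ ' ')) ≠ ['#','#','#','#'] := fun h => g4 (by rw [h])
      have n5 : s.takeWhile (fun c => decide (c ≠ ' ')) ≠ ['-'] := fun h => g5 (by rw [h])
      have n6 : s.takeWhile (fun c => decide (c ≠ ' ')) ≠ ['*'] := fun h => g6 (by rw [h])
      simp only []
      rw [if_neg (fun hsw => n1 ((K1.mp hsw).1)), if_neg (fun hsw => n2 ((K2.mp hsw).1)),
        if_neg (fun hsw => n3 ((K3.mp hsw).1)), if_neg (fun hsw => n4 ((K4.mp hsw).1)),
        if_neg (fun hsw => by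
          rcases Bool.or_eq_true_iff.mp hsw with h | h
          · exact n5 ((KD.mp h).1)
          · exact n6 ((KS.mp h).1))]
      rw [hget0]
    · -- head matches one of the keys
      simp only [pvHeadMap, PySem.Dict.get?_mk_cons, beq_iff_eq] at hget
      split_ifs at hget with g1 g2 g3 g4 g5 g6 <;>
        first
        | (injection hget with hget; subst hget)
        | simp [PySem.Dict.get?] at hget
      · have htk : s.takeWhile (fun c => decide (c ≠ ' ')) = ['#'] := by
          have := congrArg String.toList g1; simpa using this.symm
        simp only []
        rw [if_pos (K1.mpr ⟨htk, hsp⟩), htk]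
        simp [pvHeadMap, PySem.Dict.get?_mk_cons,
          PySem.List.slice_from (a := 2) s (by norm_num)]
      · have htk : s.takeWhile (fun c => decide (c ≠ ' ')) = ['#','#'] := by
          have := congrArg String.toList g2; simpa using this.symm
        have n1 : s.takeWhile (fun c => decide (c ≠ ' ')) ≠ ['#'] := by rw [htk]; simp
        simp only []
        rw [if_neg (fun hsw => n1 ((K1.mp hsw).1)), if_pos (K2.mpr ⟨htk, hsp⟩), htk]
        simp [pvHeadMap, PySem.Dict.get?_mk_cons,
          PySem.List.slice_from (a := 3) s (by norm_num)]
      · have htk : s.takeWhile (fun c => decide (c ≠ ' ')) = ['#','#','#'] := by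
          have := congrArg String.toList g3; simpa using this.symm
        have n1 : s.takeWhile (fun c => decide (c ≠ ' ')) ≠ ['#'] := by rw [htk]; simp
        have n2 : s.takeWhile (fun c => decide (c ≠ ' ')) ≠ ['#','#'] := by rw [htk]; simp
        simp only []
        rw [if_neg (fun hsw => n1 ((K1.mp hsw).1)), if_neg (fun hsw => n2 ((K2.mp hsw).1)),
          if_pos (K3.mpr ⟨htk, hsp⟩), htk]
        simp [pvHeadMap, PySem.Dict.get?_mk_cons,
          PySem.List.slice_from (a := 4) s (by norm_num)]
      · have htk : s.takeWhile (fun c => decide (c ≠ ' ')) = ['#','#','#','#'] := by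
          have := congrArg String.toList g4; simpa using this.symm
        have n1 : s.takeWhile (fun c => decide (c ≠ ' ')) ≠ ['#'] := by rw [htk]; simp
        have n2 : s.takeWhile (fun c => decide (c ≠ ' ')) ≠ ['#','#'] := by rw [htk]; simp
        have n3 : s.takeWhile (fun c => decide (c ≠ ' ')) ≠ ['#','#','#'] := by rw [htk]; simp
        simp only []
        rw [if_neg (fun hsw => n1 ((K1.mp hsw).1)), if_neg (fun hsw => n2 ((K2.mp hsw).1)),
          if_neg (fun hsw => n3 ((K3.mp hsw).1)), if_pos (K4.mpr ⟨htk, hsp⟩), htk]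
        simp [pvHeadMap, PySem.Dict.get?_mk_cons,
          PySem.List.slice_from (a := 5) s (by norm_num)]
      · have htk : s.takeWhile (fun c => decide (c ≠ ' ')) = ['-'] := by
          have := congrArg String.toList g5; simpa using this.symm
        have n1 : s.takeWhile (fun c => decide (c ≠ ' ')) ≠ ['#'] := by rw [htk]; simp
        have n2 : s.takeWhile (fun c => decide (c ≠ ' ')) ≠ ['#','#'] := by rw [htk]; simp
        have n3 : s.takeWhile (fun c => decide (c ≠ ' ')) ≠ ['#','#','#'] := by rw [htk]; simp
        have n4 : s.takeWhile (fun c => decide (c ≠ ' ')) ≠ ['#','#','#','#'] := by rw [htk]; simp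
        simp only []
        rw [if_neg (fun hsw => n1 ((K1.mp hsw).1)), if_neg (fun hsw => n2 ((K2.mp hsw).1)),
          if_neg (fun hsw => n3 ((K3.mp hsw).1)), if_neg (fun hsw => n4 ((K4.mp hsw).1)),
          if_pos (by exact Bool.or_eq_true_iff.mpr (Or.inl (KD.mpr ⟨htk, hsp⟩))), htk]
        simp [pvHeadMap, PySem.Dict.get?_mk_cons,
          PySem.List.slice_from (a := 2) s (by norm_num)]
      · have htk : s.takeWhile (fun c => decide (c ≠ ' ')) = ['*'] := by
          have := congrArg String.toList g6; simpa using this.symm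
        have n1 : s.takeWhile (fun c => decide (c ≠ ' ')) ≠ ['#'] := by rw [htk]; simp
        have n2 : s.takeWhile (fun c => decide (c ≠ ' ')) ≠ ['#','#'] := by rw [htk]; simp
        have n3 : s.takeWhile (fun c => decide (c ≠ ' ')) ≠ ['#','#','#'] := by rw [htk]; simp
        have n4 : s.takeWhile (fun c => decide (c ≠ ' ')) ≠ ['#','#','#','#'] := by rw [htk]; simp
        simp only []
        rw [if_neg (fun hsw => n1 ((K1.mp hsw).1)), if_neg (fun hsw => n2 ((K2.mp hsw).1)),
          if_neg (fun hsw => n3 ((K3.mp hsw).1)), if_neg (fun hsw => n4 ((K4.mp hsw).1)),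
          if_pos (by exact Bool.or_eq_true_iff.mpr (Or.inr (KS.mpr ⟨htk, hsp⟩))), htk]
        simp [pvHeadMap, PySem.Dict.get?_mk_cons,
          PySem.List.slice_from (a := 2) s (by norm_num)]

theorem pvFold_eq (lines : List (List Char)) :
    lines.foldl (fun acc raw =>
        let ln := PySem.Chars.strip raw
        if ln = [] then acc else acc ++ [pvDispatchA ln]) [] =
      ((lines.map PySem.Chars.strip).filter (fun l => !l.isEmpty)).map pvDispatchA := by
  have hbody : (fun (acc : List (String × String)) (raw : List Char) =>
        let ln := PySem.Chars.strip raw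
        if ln = [] then acc else acc ++ [pvDispatchA ln]) =
      (fun acc raw => if (!(PySem.Chars.strip raw).isEmpty) = true then
        acc ++ [pvDispatchA (PySem.Chars.strip raw)] else acc) := by
    funext acc raw
    by_cases h : PySem.Chars.strip raw = [] <;> simp [h]
  rw [hbody, PySem.List.foldl_append_if (fun raw => !(PySem.Chars.strip raw).isEmpty)
    (fun raw => pvDispatchA (PySem.Chars.strip raw)) lines []]
  rw [List.filter_map, List.map_map]
  simp only [List.nil_append, Function.comp_def]

theorem pvSplitNL_shape : ∀ (l pre : List Char),
    pvSplitNL pre l = (pre ++ l.takeWhile (fun x => decide (x ≠ '\n'))) ::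
      (match l.dropWhile (fun x => decide (x ≠ '\n')) with
        | [] => [] | _ :: r => pvSplitNL [] r) := by
  intro l
  induction l with
  | nil => intro pre; simp [pvSplitNL]
  | cons c r ih =>
    intro pre
    rw [List.takeWhile_cons, List.dropWhile_cons]
    by_cases hc : c = '\n'
    · subst hc
      simp [pvSplitNL]
    · rw [pvSplitNL, if_neg hc, ih]
      simp [hc]

theorem pvMain : ∀ (n : Nat) (l : List Char), l.length ≤ n → (∀ c ∈ l, pvDomChar c = true) →
    (((pvSplitNL [] l).map PySem.Chars.strip).filter (fun t => !t.isEmpty)).map pvDispatchA =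
      pvScanB l := by
  intro n
  induction n with
  | zero =>
    intro l hl _
    have : l = [] := by cases l <;> simp_all
    subst this
    simp [pvSplitNL, pvScanB, PySem.Chars.strip, PySem.Chars.lstrip, PySem.Chars.rstrip]
  | succ n ih =>
    intro l hl hdom
    cases l with
    | nil => simp [pvSplitNL, pvScanB, PySem.Chars.strip, PySem.Chars.lstrip, PySem.Chars.rstrip]
    | cons c cs =>
      rw [pvSplitNL_shape (c :: cs) []]
      have hline : ∀ x ∈ (c :: cs).takeWhile (fun x => decide (x ≠ '\n')), pvDomChar x = true :=
        fun x hx => hdom x ((List.takeWhile_prefix _).sublist.mem hx)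
      have hst := pvStrip_eq_trim _ hline
      rw [pvScanB]
      cases hd : (c :: cs).dropWhile (fun x => decide (x ≠ '\n')) with
      | nil =>
        simp only [List.nil_append, List.map_cons, List.map_nil, List.filter_cons,
          List.filter_nil, List.tail_nil, List.map_nil]
        rw [hst]
        have hsc : pvScanB ([] : List Char) = [] := by rw [pvScanB]
        rw [hsc, List.append_nil]
        generalize pvTrimB (List.takeWhile (fun x => decide (x ≠ '\n')) (c :: cs)) = t
        cases t with
        | nil => simp
        | cons a b => simp [pvTag_eq]
      | cons d r =>
        have hr : ∀ x ∈ r, pvDomChar x = true := fun x hx =>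
          hdom x ((List.dropWhile_suffix _).sublist.mem (hd ▸ List.mem_cons_of_mem d hx))
        have hrl : r.length ≤ n := by
          have h1 : (d :: r).length ≤ (c :: cs).length := hd ▸ List.length_dropWhile_le _ _
          simp only [List.length_cons] at h1 hl
          omega
        have hih := ih r hrl hr
        simp only [List.nil_append, List.map_cons, List.filter_cons, List.tail_cons]
        rw [hst]
        generalize pvTrimB (List.takeWhile (fun x => decide (x ≠ '\n')) (c :: cs)) = t
        cases t with
        | nil => simpa using hih
        | cons a b => simp [pvTag_eq, hih]

-- ===== VERDICT (by name: the statement is the Claim_ definition above) =====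
theorem process_markdown_content_spec : Claim_equal_process_markdown_content := by
  intro md hdom
  unfold Spec_process_markdown_content process_markdown_content process_markdown_content_alt
  have h : ∀ c ∈ md.toList, pvDomChar c = true := by
    unfold Dom_process_markdown_content pvDomStr at hdom
    exact fun c hc => List.all_eq_true.mp hdom c hc
  rw [pvFold_eq, pvSplitOn_nl]
  exact pvMain (md.toList.length) md.toList le_rfl h
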